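-- pv_equiv track=rewrite | github.com/Genesis2010/codetree-TILs | 241012/포탑 부수기/destroy-the-turret.py | min_row_col_tower
-- ===== SOURCE A (Python) =====
-- def min_row_col_tower(last_towers):
--     min_tower = 0
--     temp = []
--
--     for i in range(len(last_towers)):
--         r, c = last_towers[i]
--
--         if min_tower > r + c:
--             min_tower = r + c
--             temp = [(r, c)]
--         elif min_tower == r + c:
--             temp.append((r, c))
--
--     return temp
-- ===== SOURCE B (Python) =====
-- def min_row_col_tower(last_towers):
--     m = min([0] + [r + c for (r, c) in last_towers])
--     return [(r, c) for (r, c) in last_towers if r + c == m]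
-- ===== Notes on version B (the rewrite author's own statement) =====
-- stated objective: simpler
-- what changed: Replaces the stateful running-minimum loop (with its reset-and-rebuild list logic) by a two-step decomposition: first compute the threshold m = min of 0 and all r+c, then filter the towers whose r+c equals m.
import Mathlib
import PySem

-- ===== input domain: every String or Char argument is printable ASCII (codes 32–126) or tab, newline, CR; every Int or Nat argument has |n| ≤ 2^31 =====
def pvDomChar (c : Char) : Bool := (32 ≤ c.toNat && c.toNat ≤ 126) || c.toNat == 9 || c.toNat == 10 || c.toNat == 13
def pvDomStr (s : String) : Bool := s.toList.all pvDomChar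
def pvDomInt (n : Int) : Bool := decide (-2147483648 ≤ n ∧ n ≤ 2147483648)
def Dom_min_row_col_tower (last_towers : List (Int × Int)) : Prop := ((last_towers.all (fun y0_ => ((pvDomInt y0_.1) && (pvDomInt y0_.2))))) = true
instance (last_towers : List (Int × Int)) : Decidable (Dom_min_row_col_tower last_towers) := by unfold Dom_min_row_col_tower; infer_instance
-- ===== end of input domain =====

-- B computes the threshold min(0, min of r+c) up front and filters, replacing A's
-- stateful running-minimum loop; objective: simpler.

-- ===== PORT A =====
-- A's for-loop over the towers with state (min_tower, temp); reset on strictly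
-- smaller r+c, append on equal.
def min_row_col_tower (last_towers : List (Int × Int)) : List (Int × Int) :=
  (last_towers.foldl
    (fun (st : Int × List (Int × Int)) rc =>
      let r := rc.1
      let c := rc.2
      if st.1 > r + c then (r + c, [(r, c)])
      else if st.1 = r + c then (st.1, st.2 ++ [(r, c)])
      else st)
    (0, [])).2

-- ===== PORT B =====
def min_row_col_tower_alt (last_towers : List (Int × Int)) : List (Int × Int) :=
  let m := (PySem.List.min? ((0 : Int) :: last_towers.map (fun p => p.1 + p.2)) (fun y => y)).getD 0
  last_towers.filter (fun p => p.1 + p.2 = m)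

-- ===== PRECONDITION & SPEC =====
def Spec_min_row_col_tower (last_towers : List (Int × Int)) (out : List (Int × Int)) : Prop := out = min_row_col_tower_alt last_towers
instance (last_towers : List (Int × Int)) (out : List (Int × Int)) : Decidable (Spec_min_row_col_tower last_towers out) := by unfold Spec_min_row_col_tower; infer_instance

-- ===== CLAIM (what is proved, stated in full; the proofs are below) =====
def Claim_equal_min_row_col_tower : Prop := ∀ (last_towers : List (Int × Int)), Dom_min_row_col_tower last_towers → Spec_min_row_col_tower last_towers (min_row_col_tower last_towers)

-- ===== LEMMAS AND PROOFS =====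

-- the running minimum of r+c starting at m
def pvMin (xs : List (Int × Int)) (m : Int) : Int :=
  xs.foldl (fun a p => min a (p.1 + p.2)) m

theorem pvMin_le (xs : List (Int × Int)) (m : Int) : pvMin xs m ≤ m := by
  induction xs generalizing m with
  | nil => simp [pvMin]
  | cons p t ih =>
      simp only [pvMin, List.foldl_cons] at *
      exact le_trans (ih _) (min_le_left _ _)

-- characterisation of A's fold from an arbitrary state
theorem foldA_char (xs : List (Int × Int)) (m : Int) (temp : List (Int × Int)) :
    xs.foldl
      (fun (st : Int × List (Int × Int)) rc =>
        let r := rc.1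
        let c := rc.2
        if st.1 > r + c then (r + c, [(r, c)])
        else if st.1 = r + c then (st.1, st.2 ++ [(r, c)])
        else st)
      (m, temp)
    = (pvMin xs m,
       (if pvMin xs m = m then temp else []) ++
         xs.filter (fun p => p.1 + p.2 = pvMin xs m)) := by
  induction xs generalizing m temp with
  | nil => simp [pvMin]
  | cons p t ih =>
      have hstep : pvMin (p :: t) m = pvMin t (min m (p.1 + p.2)) := by
        simp [pvMin]
      by_cases h1 : m > p.1 + p.2
      · have hm : min m (p.1 + p.2) = p.1 + p.2 := min_eq_right (le_of_lt h1)
        have hne : pvMin t (p.1 + p.2) ≠ m := by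
          have := pvMin_le t (p.1 + p.2)
          omega
        simp only [List.foldl_cons, if_pos h1, ih, List.filter_cons, hstep, hm, if_neg hne]
        by_cases h2 : pvMin t (p.1 + p.2) = p.1 + p.2
        · simp [h2]
        · have : ¬ (p.1 + p.2 = pvMin t (p.1 + p.2)) := fun h => h2 h.symm
          simp [h2, this]
      · by_cases h2 : m = p.1 + p.2
        · have hm : min m (p.1 + p.2) = m := min_eq_left (le_of_eq h2)
          simp only [List.foldl_cons, if_neg h1, if_pos h2, ih, List.filter_cons, hstep, hm]
          by_cases h3 : pvMin t m = m
          · have : p.1 + p.2 = pvMin t m := by omega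
            simp [h3, this]
          · have : ¬ (p.1 + p.2 = pvMin t m) := by
              have := pvMin_le t m; omega
            simp [h3, this]
        · have hm : min m (p.1 + p.2) = m := min_eq_left (by omega)
          have : ¬ (p.1 + p.2 = pvMin t m) := by
            have := pvMin_le t m
            omega
          simp only [List.foldl_cons, if_neg h1, if_neg h2, ih, List.filter_cons, hstep, hm]
          simp [this]

theorem alt_m (xs : List (Int × Int)) :
    ((PySem.List.min? ((0 : Int) :: xs.map (fun p => p.1 + p.2)) (fun y => y)).getD 0)
      = pvMin xs 0 := by
  rw [PySem.List.min?_id_cons]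
  simp only [Option.getD_some, pvMin]
  rw [List.foldl_map]

-- ===== VERDICT (by name: the statement is the Claim_ definition above) =====
theorem min_row_col_tower_spec : Claim_equal_min_row_col_tower := by
  intro xs _
  unfold Spec_min_row_col_tower min_row_col_tower min_row_col_tower_alt
  rw [foldA_char, alt_m]
  split_ifs <;> simp
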